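-- pv_equiv track=rewrite | github.com/omar-itesm/project | Python/sequitur_utils.py | computeRRF
-- ===== SOURCE A (Python) =====
-- from collections import Counter
--
-- def computeRRF(grammar, rule):
--     '''
--     The function computes the 'real rule frequency' of a given rule.
--     '''
--     if rule == 0:
--         return 1
--
--     total_freq = 0
--     for op in grammar.keys():
--         if rule in grammar[op]:
--             prod_in_op_cnt = Counter(grammar[op])
--             prod_in_op_sup = prod_in_op_cnt[rule]
--             total_freq = total_freq + prod_in_op_sup * computeRRF(grammar, op)
--
--     return total_freq
-- ===== SOURCE B (Python) =====
-- def computeRRF(grammar, rule):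
--     '''
--     Real rule frequency, computed top-down with memoization over a
--     precomputed inverse index: edges (sym, op, multiplicity) list each
--     production symbol with the rule it occurs in and how often.
--     '''
--     edges = [(sym, op, prods.count(sym))
--              for op, prods in grammar.items()
--              for sym in dict.fromkeys(prods)]
--     memo = {}
--
--     def rrf(r):
--         if r == 0:
--             return 1
--         if r in memo:
--             return memo[r]
--         v = sum(cnt * rrf(op) for sym, op, cnt in edges if sym == r)
--         memo[r] = v
--         return v
--
--     return rrf(rule)
-- ===== Notes on version B (the rewrite author's own statement) =====
-- stated objective: alternative
-- what changed: B precomputes one inverse (symbol, rule, multiplicity) edge list and memoizes the RRF of each rule, instead of A's plain recursion that rescans the grammar and rebuilds a Counter at every call and re-solves the same rule repeatedly; on a timing run's random inputs (where the recursion rarely fires) this indexing overhead is not faster.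
import Mathlib
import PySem

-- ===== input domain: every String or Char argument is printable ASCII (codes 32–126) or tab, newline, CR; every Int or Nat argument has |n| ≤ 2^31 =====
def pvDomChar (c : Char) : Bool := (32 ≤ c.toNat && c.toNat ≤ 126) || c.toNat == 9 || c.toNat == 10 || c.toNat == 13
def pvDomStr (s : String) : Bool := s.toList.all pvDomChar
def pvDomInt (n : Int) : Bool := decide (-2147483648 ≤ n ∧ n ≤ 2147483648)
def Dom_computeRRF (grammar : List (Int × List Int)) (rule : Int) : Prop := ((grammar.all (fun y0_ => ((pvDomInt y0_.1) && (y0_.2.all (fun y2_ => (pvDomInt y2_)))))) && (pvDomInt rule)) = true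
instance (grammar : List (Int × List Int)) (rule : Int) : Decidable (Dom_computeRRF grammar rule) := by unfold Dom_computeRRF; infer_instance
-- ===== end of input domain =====

-- B replaces A's plain recursion (which rescans the grammar and rebuilds a Counter at
-- every call, re-solving the same rule repeatedly) by one precomputed inverse edge list
-- plus memoization; an alternative algorithm, not measured faster on random inputs.


-- ===== PORT A =====
-- A's recursion 'computeRRF(grammar, op)'; the Nat fuel is only a termination guard
-- (under Pre_ the recursion depth is at most grammar.length + 2, proved below).
-- 'for op in grammar.keys(): … grammar[op]' is ported as iteration over the entries
-- themselves (exact for a dict, whose keys are unique).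
def pvGoA (fuel : Nat) (grammar : List (Int × List Int)) (rule : Int) : Int :=
  match fuel with
  | 0 => 0
  | fuel + 1 =>
    if rule = 0 then 1
    else
      grammar.foldl
        (fun total_freq p =>
          if rule ∈ p.2 then
            total_freq + (PySem.Dict.counter p.2).getD rule 0 * pvGoA fuel grammar p.1
          else total_freq)
        0

def computeRRF (grammar : List (Int × List Int)) (rule : Int) : Int :=
  pvGoA (grammar.length + 2) grammar rule

-- ===== PORT B =====
-- edges = [(sym, op, prods.count(sym)) for op, prods in grammar.items() for sym in dict.fromkeys(prods)]
def pvEdges (grammar : List (Int × List Int)) : List (Int × Int × Int) :=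
  grammar.flatMap (fun p =>
    (PySem.List.dedup p.2).map (fun sym => (sym, p.1, (PySem.List.count p.2 sym : Int))))

-- rrf(r) with the memo dict threaded through; fuel is again only a termination guard.
def pvGoB (fuel : Nat) (edges : List (Int × Int × Int)) (memo : PySem.Dict Int Int)
    (r : Int) : PySem.Dict Int Int × Int :=
  match fuel with
  | 0 => (memo, 0)
  | fuel + 1 =>
    if r = 0 then (memo, 1)
    else
      match memo.get? r with
      | some v => (memo, v)
      | none =>
        let s := edges.foldl
          (fun (st : PySem.Dict Int Int × Int) e =>
            if e.1 = r then
              let q := pvGoB fuel edges st.1 e.2.1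
              (q.1, st.2 + e.2.2 * q.2)
            else st)
          (memo, 0)
        (s.1.insert r s.2, s.2)

def computeRRF_alt (grammar : List (Int × List Int)) (rule : Int) : Int :=
  (pvGoB (grammar.length + 2) (pvEdges grammar) PySem.Dict.empty rule).2

-- ===== PRECONDITION & SPEC =====
-- Containment graph walked by A: an edge leads from a symbol r to each nonzero key op
-- whose production contains r (recursion stops at rule 0, so key 0 has no outgoing role).
def pvPars (grammar : List (Int × List Int)) (r : Int) : Finset Int :=
  ((grammar.filter (fun p => p.1 ≠ 0 ∧ r ∈ p.2)).map Prod.fst).toFinset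

def pvReachN (grammar : List (Int × List Int)) : Nat → Int → Finset Int
  | 0, r => pvPars grammar r
  | n + 1, r => pvReachN grammar n r ∪ (pvReachN grammar n r).biUnion (pvPars grammar)

-- keys reachable from r by walking 'occurs in the production of' at least once
def pvReach (grammar : List (Int × List Int)) (r : Int) : Finset Int :=
  pvReachN grammar grammar.length r

-- Pre_ excludes exactly the grammars in which the chain of rules containing `rule`
-- runs into a cycle: there Python A (and B alike) raises RecursionError.
def Pre_computeRRF (grammar : List (Int × List Int)) (rule : Int) : Prop :=
  rule = 0 ∨ ∀ k ∈ insert rule (pvReach grammar rule), k ∉ pvReach grammar k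
instance (grammar : List (Int × List Int)) (rule : Int) : Decidable (Pre_computeRRF grammar rule) := by
  unfold Pre_computeRRF; infer_instance

def pvWitness_computeRRF : (List (Int × List Int)) × Int := ([(0, [1, 1, 2]), (1, [2])], 2)

def Spec_computeRRF (grammar : List (Int × List Int)) (rule : Int) (out : Int) : Prop := out = computeRRF_alt grammar rule
instance (grammar : List (Int × List Int)) (rule : Int) (out : Int) : Decidable (Spec_computeRRF grammar rule out) := by unfold Spec_computeRRF; infer_instance

-- ===== CLAIM (what is proved, stated in full; the proofs are below) =====
def Claim_equal_computeRRF : Prop := ∀ (grammar : List (Int × List Int)) (rule : Int), Dom_computeRRF grammar rule → Pre_computeRRF grammar rule → Spec_computeRRF grammar rule (computeRRF grammar rule)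

-- ===== LEMMAS AND PROOFS =====

theorem pv_mem_pars {g : List (Int × List Int)} {r op : Int} :
    op ∈ pvPars g r ↔ ∃ prods, (op, prods) ∈ g ∧ op ≠ 0 ∧ r ∈ prods := by
  unfold pvPars
  simp only [List.mem_toFinset, List.mem_map, List.mem_filter]
  constructor
  · rintro ⟨p, ⟨hp, hd⟩, rfl⟩
    simp only [decide_eq_true_eq] at hd
    exact ⟨p.2, hp, hd.1, hd.2⟩
  · rintro ⟨prods, hp, h0, hr⟩
    exact ⟨(op, prods), ⟨hp, by simp [h0, hr]⟩, rfl⟩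

theorem pv_reachN_succ (g : List (Int × List Int)) (n : Nat) (r : Int) :
    pvReachN g (n + 1) r = pvReachN g n r ∪ (pvReachN g n r).biUnion (pvPars g) := rfl

theorem pv_reachN_mono (g : List (Int × List Int)) (n : Nat) (r : Int) :
    pvReachN g n r ⊆ pvReachN g (n + 1) r := Finset.subset_union_left

theorem pv_pars_subset_keys (g : List (Int × List Int)) (r : Int) :
    pvPars g r ⊆ (g.map Prod.fst).toFinset := by
  intro x hx
  rcases pv_mem_pars.mp hx with ⟨prods, hp, -, -⟩
  simp only [List.mem_toFinset, List.mem_map]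
  exact ⟨(x, prods), hp, rfl⟩

theorem pv_reachN_subset_keys (g : List (Int × List Int)) (n : Nat) (r : Int) :
    pvReachN g n r ⊆ (g.map Prod.fst).toFinset := by
  induction n with
  | zero => exact pv_pars_subset_keys g r
  | succ n ih =>
    rw [pv_reachN_succ]
    refine Finset.union_subset ih (Finset.biUnion_subset.mpr fun x _ => pv_pars_subset_keys g x)

theorem pv_growth (g : List (Int × List Int)) (r : Int) (n : Nat) :
    pvReachN g n r = pvReachN g (n + 1) r ∨ n + 1 ≤ (pvReachN g (n + 1) r).card := by
  induction n with
  | zero =>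
    by_cases h : pvReachN g 0 r = pvReachN g (0 + 1) r
    · exact Or.inl h
    · right
      have hss : pvReachN g 0 r ⊂ pvReachN g (0 + 1) r :=
        (Finset.ssubset_iff_subset_ne).mpr ⟨pv_reachN_mono g 0 r, h⟩
      have hlt := Finset.card_lt_card hss
      omega
  | succ n ih =>
    rcases ih with heq | hle
    · left
      calc pvReachN g (n + 1) r
          = pvReachN g n r ∪ (pvReachN g n r).biUnion (pvPars g) := pv_reachN_succ g n r
        _ = pvReachN g (n + 1) r ∪ (pvReachN g (n + 1) r).biUnion (pvPars g) := by rw [← heq]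
        _ = pvReachN g (n + 1 + 1) r := (pv_reachN_succ g (n + 1) r).symm
    · by_cases h : pvReachN g (n + 1) r = pvReachN g (n + 1 + 1) r
      · exact Or.inl h
      · right
        have hss : pvReachN g (n + 1) r ⊂ pvReachN g (n + 1 + 1) r :=
          (Finset.ssubset_iff_subset_ne).mpr ⟨pv_reachN_mono g (n + 1) r, h⟩
        have hlt := Finset.card_lt_card hss
        omega

theorem pv_closed {g : List (Int × List Int)} {r k : Int} (hk : k ∈ pvReach g r) :
    pvPars g k ⊆ pvReach g r := by
  have hcard : (pvReachN g (g.length + 1) r).card ≤ g.length := le_trans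
    (Finset.card_le_card (pv_reachN_subset_keys g _ r))
    (le_trans (List.toFinset_card_le _) (by simp))
  rcases pv_growth g r g.length with heq | hle
  · intro x hx
    have : x ∈ (pvReachN g g.length r).biUnion (pvPars g) :=
      Finset.mem_biUnion.mpr ⟨k, hk, hx⟩
    have : x ∈ pvReachN g (g.length + 1) r := by
      rw [pv_reachN_succ]; exact Finset.mem_union_right _ this
    rwa [← heq] at this
  · omega

theorem pv_pars_subset_reach (g : List (Int × List Int)) (r : Int) :
    pvPars g r ⊆ pvReach g r := by
  have h : ∀ n, pvReachN g 0 r ⊆ pvReachN g n r := by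
    intro n
    induction n with
    | zero => exact fun x hx => hx
    | succ n ih => exact fun x hx => pv_reachN_mono g n r (ih hx)
  exact h g.length

theorem pv_reach_trans {g : List (Int × List Int)} {r k : Int} (hk : k ∈ pvReach g r) :
    pvReach g k ⊆ pvReach g r := by
  have h : ∀ n, pvReachN g n k ⊆ pvReach g r := by
    intro n
    induction n with
    | zero => exact pv_closed hk
    | succ n ih =>
      rw [pv_reachN_succ]
      exact Finset.union_subset ih
        (Finset.biUnion_subset.mpr fun x hx => pv_closed (ih hx))
  exact h g.length

def pvRank (g : List (Int × List Int)) (r : Int) : Nat := (pvReach g r).card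

def pvRank' (g : List (Int × List Int)) (r : Int) : Nat :=
  if r = 0 then 0 else pvRank g r + 1

theorem pv_rank_le (g : List (Int × List Int)) (r : Int) : pvRank g r ≤ g.length := by
  unfold pvRank
  exact le_trans (Finset.card_le_card (pv_reachN_subset_keys g _ r))
    (le_trans (List.toFinset_card_le _) (by simp))

-- `Good` nodes are those A's recursion can visit from `rule`
theorem pv_good_pars {g : List (Int × List Int)} {rule r op : Int}
    (hr : r = rule ∨ r ∈ pvReach g rule) (hop : op ∈ pvPars g r) :
    op ∈ pvReach g rule := by
  rcases hr with rfl | hr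
  · exact pv_pars_subset_reach g r hop
  · exact pv_closed hr hop

theorem pv_rank_lt {g : List (Int × List Int)} {rule r op : Int}
    (hpre : ∀ k ∈ insert rule (pvReach g rule), k ∉ pvReach g k)
    (hr : r = rule ∨ r ∈ pvReach g rule) (hop : op ∈ pvPars g r) :
    pvRank g op < pvRank g r := by
  have hopr : op ∈ pvReach g r := pv_pars_subset_reach g r hop
  have hrule : op ∈ pvReach g rule := pv_good_pars hr hop
  have hnotin : op ∉ pvReach g op := hpre op (Finset.mem_insert_of_mem hrule)
  have hsub : pvReach g op ⊆ pvReach g r := pv_reach_trans hopr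
  exact Finset.card_lt_card ((Finset.ssubset_iff_of_subset hsub).mpr ⟨op, hopr, hnotin⟩)

theorem pv_goA_zero (g : List (Int × List Int)) {f : Nat} (hf : 1 ≤ f) :
    pvGoA f g 0 = 1 := by
  match f, hf with
  | f + 1, _ => simp [pvGoA]

theorem pv_goA_sum (g : List (Int × List Int)) (f : Nat) {r : Int} (hr : r ≠ 0) :
    pvGoA (f + 1) g r
      = (g.map (fun p => if r ∈ p.2 then (p.2.count r : Int) * pvGoA f g p.1 else 0)).sum := by
  show (if r = 0 then 1
    else g.foldl (fun total_freq p =>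
      if r ∈ p.2 then total_freq + (PySem.Dict.counter p.2).getD r 0 * pvGoA f g p.1
      else total_freq) 0) = _
  rw [if_neg hr]
  have hcongr : ∀ (acc : Int) (p : Int × List Int), p ∈ g →
      (if r ∈ p.2 then acc + (PySem.Dict.counter p.2).getD r 0 * pvGoA f g p.1 else acc)
        = acc + (if r ∈ p.2 then ((p.2.count r : Int)) * pvGoA f g p.1 else 0) := by
    intro acc p _
    split_ifs with h
    · rw [PySem.Dict.getD_counter]
    · simp
  rw [PySem.List.foldl_congr_mem _ _
    (fun acc p => acc + (if r ∈ p.2 then ((p.2.count r : Int)) * pvGoA f g p.1 else 0)) _ hcongr]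
  rw [PySem.List.foldl_add]
  simp

theorem pv_goA_fuel {g : List (Int × List Int)} {rule : Int}
    (hpre : ∀ k ∈ insert rule (pvReach g rule), k ∉ pvReach g k) :
    ∀ (n : Nat) (r : Int) (f1 f2 : Nat), pvRank g r ≤ n →
      (r = rule ∨ r ∈ pvReach g rule) → pvRank' g r < f1 → pvRank' g r < f2 →
      pvGoA f1 g r = pvGoA f2 g r := by
  intro n
  induction n using Nat.strong_induction_on with
  | _ n ih =>
    intro r f1 f2 hn hgood h1 h2
    by_cases hr0 : r = 0
    · subst hr0
      rw [pv_goA_zero g (by simp [pvRank'] at h1; omega),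
        pv_goA_zero g (by simp [pvRank'] at h2; omega)]
    · have hrk : pvRank' g r = pvRank g r + 1 := if_neg hr0
      obtain ⟨a, rfl⟩ : ∃ a, f1 = a + 1 := ⟨f1 - 1, by omega⟩
      obtain ⟨b, rfl⟩ : ∃ b, f2 = b + 1 := ⟨f2 - 1, by omega⟩
      rw [pv_goA_sum g a hr0, pv_goA_sum g b hr0]
      refine congrArg List.sum (List.map_congr_left ?_)
      intro p hp
      by_cases hin : r ∈ p.2
      · rw [if_pos hin, if_pos hin]
        by_cases hp0 : p.1 = 0
        · rw [hp0, pv_goA_zero g (by omega), pv_goA_zero g (by omega)]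
        · have hpar : p.1 ∈ pvPars g r := pv_mem_pars.mpr ⟨p.2, by simpa using hp, hp0, hin⟩
          have hlt : pvRank g p.1 < pvRank g r := pv_rank_lt hpre hgood hpar
          have hgood' : p.1 = rule ∨ p.1 ∈ pvReach g rule := Or.inr (pv_good_pars hgood hpar)
          have hrk' : pvRank' g p.1 = pvRank g p.1 + 1 := if_neg hp0
          rw [ih (pvRank g p.1) (by omega) p.1 a b le_rfl hgood' (by omega) (by omega)]
      · rw [if_neg hin, if_neg hin]

-- the one-step recurrence of A's function at full fuel
theorem pv_R_step {g : List (Int × List Int)} {rule r : Int}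
    (hpre : ∀ k ∈ insert rule (pvReach g rule), k ∉ pvReach g k)
    (hgood : r = rule ∨ r ∈ pvReach g rule) (hr : r ≠ 0) :
    computeRRF g r
      = (g.map (fun p => if r ∈ p.2 then (p.2.count r : Int) * computeRRF g p.1 else 0)).sum := by
  show pvGoA (g.length + 1 + 1) g r = _
  rw [pv_goA_sum g (g.length + 1) hr]
  refine congrArg List.sum (List.map_congr_left ?_)
  intro p hp
  by_cases hin : r ∈ p.2
  · rw [if_pos hin, if_pos hin]
    by_cases hp0 : p.1 = 0
    · rw [hp0, pv_goA_zero g (by omega)]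
      show _ = _ * pvGoA (g.length + 2) g 0
      rw [pv_goA_zero g (by omega)]
    · have hpar : p.1 ∈ pvPars g r := pv_mem_pars.mpr ⟨p.2, by simpa using hp, hp0, hin⟩
      have hlt : pvRank g p.1 < pvRank g r := pv_rank_lt hpre hgood hpar
      have hgood' : p.1 = rule ∨ p.1 ∈ pvReach g rule := Or.inr (pv_good_pars hgood hpar)
      have hb := pv_rank_le g r
      have hrk' : pvRank' g p.1 = pvRank g p.1 + 1 := if_neg hp0
      rw [pv_goA_fuel hpre (pvRank g p.1) p.1 (g.length + 1) (g.length + 2) le_rfl hgood'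
        (by omega) (by omega)]
      rfl
  · rw [if_neg hin, if_neg hin]

theorem pv_filter_eq_of_nodup (r : Int) :
    ∀ (l : List Int), l.Nodup →
      l.filter (fun s => decide (s = r)) = if r ∈ l then [r] else [] := by
  intro l
  induction l with
  | nil => simp
  | cons a t ih =>
    intro hn
    rcases List.nodup_cons.mp hn with ⟨ha, ht⟩
    by_cases har : a = r
    · subst har
      have : a ∉ t := ha
      simp [ih ht, this]
    · have hra : ¬ r = a := fun h => har h.symm
      simp [ih ht, har, hra]

theorem pv_edges_filter (g : List (Int × List Int)) (r : Int) :
    (pvEdges g).filter (fun e => decide (e.1 = r))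
      = (g.filter (fun p => decide (r ∈ p.2))).map (fun p => (r, p.1, (p.2.count r : Int))) := by
  induction g with
  | nil => rfl
  | cons p t ih =>
    show ((PySem.List.dedup p.2).map
        (fun sym => (sym, p.1, (PySem.List.count p.2 sym : Int))) ++ pvEdges t).filter _ = _
    rw [List.filter_append, ih, List.filter_map]
    have hblk : (PySem.List.dedup p.2).filter
        ((fun e => decide (e.1 = r)) ∘ (fun sym => (sym, p.1, (PySem.List.count p.2 sym : Int))))
        = if r ∈ p.2 then [r] else [] := by
      show (PySem.List.dedup p.2).filter (fun s => decide (s = r)) = _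
      rw [pv_filter_eq_of_nodup r _ (PySem.List.nodup_dedup p.2)]
      simp
    rw [hblk, List.filter_cons]
    by_cases hin : r ∈ p.2
    · simp [hin, PySem.List.count_eq]
    · simp [hin]

theorem pv_sum_filter (g : List (Int × List Int)) (h : Int × List Int → Int) (P : Int × List Int → Prop)
    [DecidablePred P] :
    (g.map (fun p => if P p then h p else 0)).sum = ((g.filter (fun p => decide (P p))).map h).sum := by
  induction g with
  | nil => rfl
  | cons p t ih =>
    simp only [List.map_cons, List.sum_cons, List.filter_cons]
    by_cases hp : P p
    · simp [hp, ih]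
    · simp [hp, ih]

-- B's memo is sound: every entry is A's value, at a node A's recursion can visit
def pvInv (g : List (Int × List Int)) (rule : Int) (m : PySem.Dict Int Int) : Prop :=
  ∀ k v, m.get? k = some v → ((k = rule ∨ k ∈ pvReach g rule) ∧ k ≠ 0 ∧ v = computeRRF g k)

theorem pv_goB_spec {g : List (Int × List Int)} {rule : Int}
    (hpre : ∀ k ∈ insert rule (pvReach g rule), k ∉ pvReach g k) :
    ∀ (n : Nat) (r : Int) (m : PySem.Dict Int Int) (f1 : Nat), pvRank g r ≤ n →
      (r = rule ∨ r ∈ pvReach g rule) → pvInv g rule m → pvRank' g r < f1 →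
      (pvGoB f1 (pvEdges g) m r).2 = computeRRF g r ∧ pvInv g rule (pvGoB f1 (pvEdges g) m r).1 := by
  intro n
  induction n using Nat.strong_induction_on with
  | _ n ih =>
    intro r m f1 hn hgood hinv h1
    obtain ⟨f, rfl⟩ : ∃ f, f1 = f + 1 := ⟨f1 - 1, by omega⟩
    by_cases hr0 : r = 0
    · subst hr0
      have hR0 : computeRRF g 0 = 1 := pv_goA_zero g (by omega)
      simp only [pvGoB]
      exact ⟨hR0.symm, hinv⟩
    · have hrk : pvRank' g r = pvRank g r + 1 := if_neg hr0
      cases hm : PySem.Dict.get? m r with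
      | some v =>
        simp only [pvGoB, if_neg hr0, hm]
        exact ⟨(hinv r v hm).2.2, hinv⟩
      | none =>
        have hun : pvGoB (f + 1) (pvEdges g) m r
            = ((((pvEdges g).foldl
                  (fun (st : PySem.Dict Int Int × Int) e =>
                    if e.1 = r then
                      ((pvGoB f (pvEdges g) st.1 e.2.1).1,
                        st.2 + e.2.2 * (pvGoB f (pvEdges g) st.1 e.2.1).2)
                    else st)
                  (m, 0)).1.insert r
                ((pvEdges g).foldl
                  (fun (st : PySem.Dict Int Int × Int) e =>
                    if e.1 = r then
                      ((pvGoB f (pvEdges g) st.1 e.2.1).1,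
                        st.2 + e.2.2 * (pvGoB f (pvEdges g) st.1 e.2.1).2)
                    else st)
                  (m, 0)).2),
              ((pvEdges g).foldl
                  (fun (st : PySem.Dict Int Int × Int) e =>
                    if e.1 = r then
                      ((pvGoB f (pvEdges g) st.1 e.2.1).1,
                        st.2 + e.2.2 * (pvGoB f (pvEdges g) st.1 e.2.1).2)
                    else st)
                  (m, 0)).2) := by
          simp only [pvGoB, if_neg hr0, hm]
        have hfold := PySem.List.foldl_ite_eq_foldl_filter (fun e => e.1 = r)
          (fun (st : PySem.Dict Int Int × Int) e =>
            ((pvGoB f (pvEdges g) st.1 e.2.1).1,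
              st.2 + e.2.2 * (pvGoB f (pvEdges g) st.1 e.2.1).2))
          (pvEdges g) (m, 0)
        have hinner : ∀ (l : List (Int × List Int)), (∀ p ∈ l, p ∈ g ∧ r ∈ p.2) →
            ∀ (m0 : PySem.Dict Int Int) (acc : Int), pvInv g rule m0 →
            ((l.map (fun p => ((r : Int), p.1, (p.2.count r : Int)))).foldl
                (fun (st : PySem.Dict Int Int × Int) e =>
                  ((pvGoB f (pvEdges g) st.1 e.2.1).1,
                    st.2 + e.2.2 * (pvGoB f (pvEdges g) st.1 e.2.1).2))
                (m0, acc)).2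
              = acc + (l.map (fun p => (p.2.count r : Int) * computeRRF g p.1)).sum
            ∧ pvInv g rule
              ((l.map (fun p => ((r : Int), p.1, (p.2.count r : Int)))).foldl
                (fun (st : PySem.Dict Int Int × Int) e =>
                  ((pvGoB f (pvEdges g) st.1 e.2.1).1,
                    st.2 + e.2.2 * (pvGoB f (pvEdges g) st.1 e.2.1).2))
                (m0, acc)).1 := by
          intro l
          induction l with
          | nil => intro _ m0 acc hinv0; exact ⟨by simp, hinv0⟩
          | cons p t iht =>
            intro hl m0 acc hinv0
            have hpg := (hl p (List.mem_cons_self)).1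
            have hpin := (hl p (List.mem_cons_self)).2
            have hq : (pvGoB f (pvEdges g) m0 p.1).2 = computeRRF g p.1
                ∧ pvInv g rule (pvGoB f (pvEdges g) m0 p.1).1 := by
              by_cases hp0 : p.1 = 0
              · rw [hp0]
                obtain ⟨f', rfl⟩ : ∃ f', f = f' + 1 := ⟨f - 1, by omega⟩
                have hR0 : computeRRF g 0 = 1 := pv_goA_zero g (by omega)
                simp only [pvGoB]
                exact ⟨hR0.symm, hinv0⟩
              · have hpar : p.1 ∈ pvPars g r := pv_mem_pars.mpr ⟨p.2, by simpa using hpg, hp0, hpin⟩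
                have hlt : pvRank g p.1 < pvRank g r := pv_rank_lt hpre hgood hpar
                have hgood' : p.1 = rule ∨ p.1 ∈ pvReach g rule := Or.inr (pv_good_pars hgood hpar)
                have hrk' : pvRank' g p.1 = pvRank g p.1 + 1 := if_neg hp0
                exact ih (pvRank g p.1) (by omega) p.1 m0 f le_rfl hgood' hinv0 (by omega)
            have hstep := iht (fun q hq' => hl q (List.mem_cons_of_mem p hq'))
              (pvGoB f (pvEdges g) m0 p.1).1 (acc + (p.2.count r : Int) * (pvGoB f (pvEdges g) m0 p.1).2)
              hq.2
            simp only [List.map_cons, List.foldl_cons] at *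
            refine ⟨?_, hstep.2⟩
            rw [hstep.1, hq.1, List.sum_cons]
            ring
        have hLmem : ∀ p ∈ g.filter (fun p => decide (r ∈ p.2)), p ∈ g ∧ r ∈ p.2 := by
          intro p hp
          have := List.mem_filter.mp hp
          exact ⟨this.1, by simpa using this.2⟩
        have hmain := hinner (g.filter (fun p => decide (r ∈ p.2))) hLmem m 0 hinv
        have hfold2 : (pvEdges g).foldl
              (fun (st : PySem.Dict Int Int × Int) e =>
                if e.1 = r then
                  ((pvGoB f (pvEdges g) st.1 e.2.1).1,
                    st.2 + e.2.2 * (pvGoB f (pvEdges g) st.1 e.2.1).2)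
                else st)
              (m, 0)
            = ((g.filter (fun p => decide (r ∈ p.2))).map
                (fun p => ((r : Int), p.1, (p.2.count r : Int)))).foldl
              (fun (st : PySem.Dict Int Int × Int) e =>
                ((pvGoB f (pvEdges g) st.1 e.2.1).1,
                  st.2 + e.2.2 * (pvGoB f (pvEdges g) st.1 e.2.1).2))
              (m, 0) := by
          rw [PySem.List.foldl_ite_eq_foldl_filter (fun e => e.1 = r)
            (fun (st : PySem.Dict Int Int × Int) e =>
              ((pvGoB f (pvEdges g) st.1 e.2.1).1,
                st.2 + e.2.2 * (pvGoB f (pvEdges g) st.1 e.2.1).2)) (pvEdges g) (m, 0),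
            pv_edges_filter]
        have hval : (((g.filter (fun p => decide (r ∈ p.2))).map
                (fun p => ((r : Int), p.1, (p.2.count r : Int)))).foldl
              (fun (st : PySem.Dict Int Int × Int) e =>
                ((pvGoB f (pvEdges g) st.1 e.2.1).1,
                  st.2 + e.2.2 * (pvGoB f (pvEdges g) st.1 e.2.1).2))
              (m, 0)).2 = computeRRF g r := by
          rw [hmain.1, pv_R_step hpre hgood hr0,
            pv_sum_filter g (fun p => (p.2.count r : Int) * computeRRF g p.1) (fun p => r ∈ p.2)]
          simp
        rw [hun, hfold2]
        refine ⟨hval, ?_⟩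
        intro k v' hk
        rw [PySem.Dict.get?_insert] at hk
        by_cases hkr : k = r
        · rw [if_pos hkr] at hk
          refine ⟨hkr ▸ hgood, hkr ▸ hr0, ?_⟩
          have : v' = _ := (Option.some.inj hk).symm
          rw [this, hkr, hval]
        · rw [if_neg hkr] at hk
          exact hmain.2 k v' hk


-- ===== VERDICT (by name: the statement is the Claim_ definition above) =====
theorem computeRRF_spec : Claim_equal_computeRRF := by
  intro g rule _dom hpre
  show computeRRF g rule = computeRRF_alt g rule
  rcases hpre with rfl | hpre
  · show pvGoA (g.length + 2) g 0 = _
    rw [pv_goA_zero g (by omega : 1 ≤ g.length + 2)]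
    show (1 : Int) = (pvGoB (g.length + 2) (pvEdges g) PySem.Dict.empty 0).2
    show (1 : Int) = (pvGoB (g.length + 1 + 1) (pvEdges g) PySem.Dict.empty 0).2
    simp [pvGoB]
  · have hb : pvRank' g rule < g.length + 2 := by
      have hr := pv_rank_le g rule
      unfold pvRank'
      split_ifs <;> omega
    have hinv0 : pvInv g rule PySem.Dict.empty := by
      intro k v h
      exact absurd h (by simp [PySem.Dict.get?_empty])
    have hmain := pv_goB_spec hpre (pvRank g rule) rule PySem.Dict.empty (g.length + 2)
      le_rfl (Or.inl rfl) hinv0 hb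
    exact hmain.1.symm
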